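-- pv_equiv track=rewrite | github.com/benrm/AdventOfCode2020 | day16.2.py | search
-- ===== SOURCE A (Python) =====
-- def search(fields, available):
--     (field, indices) = fields.pop(0)
--     for idx in indices:
--         if idx in available:
--             if len(fields) == 0:
--                 return { field: idx }
--
--             fields_copy = fields.copy()
--             avail_copy = available.copy()
--             avail_copy.remove(idx)
--
--             ret = search(fields_copy, avail_copy)
--
--             if ret != None:
--                 ret[field] = idx
--                 return ret
--     return None
-- ===== SOURCE B (Python) =====
-- def search(fields, available):
--     # Iterative explicit-stack backtracking (same search order as the recursive
--     # version); like it, pops the first field from the caller's list.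
--     field, indices = fields.pop(0)
--     frames = [(field, list(indices), set(available))]
--     chosen = []
--     while frames:
--         field, indices, avail = frames[-1]
--         if not indices:
--             frames.pop()
--             if chosen:
--                 chosen.pop()
--             continue
--         idx = indices[0]
--         frames[-1] = (field, indices[1:], avail)
--         if idx in avail:
--             if len(frames) == len(fields) + 1:
--                 result = {field: idx}
--                 for (f, _i, _a), c in zip(reversed(frames[:-1]), reversed(chosen)):
--                     result[f] = c
--                 return result
--             new_avail = set(avail)
--             new_avail.remove(idx)
--             chosen.append(idx)
--             nf, nind = fields[len(frames) - 1]
--             frames.append((nf, list(nind), new_avail))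
--     return None
-- ===== Notes on version B (the rewrite author's own statement) =====
-- stated objective: alternative
-- what changed: Replaces A's recursive DFS with an iterative explicit-stack backtracking loop: frames hold (field, remaining indices, available set), a chosen-index list tracks the partial assignment, and the result dict is built once at the success leaf from the whole stack instead of on the way back up the recursion.
import Mathlib
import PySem

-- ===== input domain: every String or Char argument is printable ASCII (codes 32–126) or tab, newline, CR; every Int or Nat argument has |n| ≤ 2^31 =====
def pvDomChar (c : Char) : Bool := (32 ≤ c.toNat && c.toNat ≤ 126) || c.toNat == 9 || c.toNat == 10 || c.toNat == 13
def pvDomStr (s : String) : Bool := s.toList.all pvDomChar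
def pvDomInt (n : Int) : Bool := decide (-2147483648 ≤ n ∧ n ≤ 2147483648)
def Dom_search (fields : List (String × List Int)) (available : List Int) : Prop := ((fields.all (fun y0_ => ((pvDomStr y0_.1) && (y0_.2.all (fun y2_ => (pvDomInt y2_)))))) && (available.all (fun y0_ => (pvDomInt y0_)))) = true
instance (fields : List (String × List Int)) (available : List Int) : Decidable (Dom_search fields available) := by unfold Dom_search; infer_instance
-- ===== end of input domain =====

-- B replaces A's recursive DFS by an iterative explicit-stack backtracking loop (same search
-- order, same return value; objective: alternative decomposition, not speed). Both A and B pop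
-- the first element off the caller's `fields` list; the equivalence proved here is about the
-- RETURN value only.

-- ===== PORT A =====
-- search returns a dict; we compute it as PySem.Dict and hand back its items list at the boundary.
mutual
def searchD (fields : List (String × List Int)) (available : List Int) : Option (PySem.Dict String Int) :=
  match fields with
  | [] => none  -- Python: fields.pop(0) raises IndexError here; excluded by Pre_search
  | (field, indices) :: rest => loopD field indices rest available
  termination_by (fields.length, 1, 0)

-- the `for idx in indices` loop of A
def loopD (field : String) (indices : List Int) (rest : List (String × List Int)) (available : List Int) : Option (PySem.Dict String Int) :=
  match indices with
  | [] => none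
  | idx :: is =>
    if available.contains idx then
      if rest = [] then some (PySem.Dict.insert PySem.Dict.empty field idx)
      else
        match PySem.Set.remove? available idx with
        | none => none  -- unreachable: idx ∈ available (Python would raise KeyError)
        | some avail' =>
          match searchD rest avail' with
          | some ret => some (PySem.Dict.insert ret field idx)
          | none => loopD field is rest available
    else loopD field is rest available
  termination_by (rest.length + 1, 0, indices.length)
end

def search (fields : List (String × List Int)) (available : List Int) : Option (List (String × Int)) :=
  (searchD fields available).map PySem.Dict.items

-- ===== PORT B =====
-- fuel bound for the while-loop (a totality guard only; it strictly exceeds the number of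
-- loop iterations B can perform, see costL_le below)
def fuelB : List (String × List Int) → Nat
  | [] => 0
  | (_, ind) :: r => ind.length * (1 + fuelB r) + 1

-- one frame = (field, remaining indices, still-available set); `chosen` holds the index picked
-- at each frame below the top, most recent first.  `rest` is the fields list after the pop.
def runB (rest : List (String × List Int)) : Nat → List (String × List Int × List Int) → List Int → Option (Option (PySem.Dict String Int))
  | 0, _, _ => none  -- out of fuel; never reached from search_alt
  | _ + 1, [], _ => some none                    -- stack empty: return None
  | fuel + 1, (field, indices, avail) :: stack, chosen =>
    match indices with
    | [] => runB rest fuel stack chosen.tail     -- frame exhausted: backtrack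
    | idx :: is =>
      if avail.contains idx then
        if stack.length = rest.length then       -- len(frames) == len(fields) + 1: complete
          some (some ((stack.zip chosen).foldl
            (fun acc fc => PySem.Dict.insert acc fc.1.1 fc.2)
            (PySem.Dict.insert PySem.Dict.empty field idx)))
        else
          match rest.drop stack.length with      -- fields[len(frames) - 1]
          | [] => none                           -- unreachable: stack.length < rest.length here
          | (nf, nind) :: _ =>
            match PySem.Set.remove? avail idx with
            | none => none                       -- unreachable: idx ∈ avail
            | some avail' =>
              runB rest fuel ((nf, nind, avail') :: (field, is, avail) :: stack) (idx :: chosen)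
      else runB rest fuel ((field, is, avail) :: stack) chosen

def search_alt (fields : List (String × List Int)) (available : List Int) : Option (List (String × Int)) :=
  match fields with
  | [] => none  -- Python: fields.pop(0) raises IndexError here; excluded by Pre_search
  | (field, indices) :: rest =>
    ((runB rest (indices.length * (1 + fuelB rest) + 2) [(field, indices, available)] []).getD none).map PySem.Dict.items

-- ===== PRECONDITION & SPEC =====
-- Pre_ excludes only the empty fields list, on which A (and B) raise IndexError via fields.pop(0).
def Pre_search (fields : List (String × List Int)) (available : List Int) : Prop := fields ≠ []
instance (fields : List (String × List Int)) (available : List Int) : Decidable (Pre_search fields available) := by unfold Pre_search; infer_instance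
def pvWitness_search : (List (String × List Int)) × List Int := ([("a", [0])], [0])

def Spec_search (fields : List (String × List Int)) (available : List Int) (out : Option (List (String × Int))) : Prop := out = search_alt fields available
instance (fields : List (String × List Int)) (available : List Int) (out : Option (List (String × Int))) : Decidable (Spec_search fields available out) := by unfold Spec_search; infer_instance

-- ===== CLAIM (what is proved, stated in full; the proofs are below) =====
def Claim_equal_search : Prop := ∀ (fields : List (String × List Int)) (available : List Int), Dom_search fields available → Pre_search fields available → Spec_search fields available (search fields available)

-- ===== LEMMAS AND PROOFS =====

-- folding the chosen indices of the remaining stack into a dict (what B does at the success leaf,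
-- and what A's nested `ret[field] = idx` inserts amount to)
def wrapD (d : PySem.Dict String Int) (stack : List (String × List Int × List Int)) (chosen : List Int) : PySem.Dict String Int :=
  (stack.zip chosen).foldl (fun acc fc => PySem.Dict.insert acc fc.1.1 fc.2) d

-- exact number of loop iterations B spends exploring a subtree before giving up (an upper bound
-- in the success cases)
mutual
def costS : List (String × List Int) → List Int → Nat
  | [], _ => 0
  | (_, indices) :: rest, avail => costL indices rest avail
  termination_by fields _ => (fields.length, 1, 0)
def costL : List Int → List (String × List Int) → List Int → Nat
  | [], _, _ => 1
  | idx :: is, rest, avail =>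
    if avail.contains idx then
      if rest = [] then 1 + costL is rest avail
      else
        match PySem.Set.remove? avail idx with
        | none => 1 + costL is rest avail
        | some avail' => 1 + costS rest avail' + costL is rest avail
    else 1 + costL is rest avail
  termination_by indices rest _ => (rest.length + 1, 0, indices.length)
end

def costStack (rest : List (String × List Int)) : List (String × List Int × List Int) → Nat
  | [] => 1
  | (_, indices, avail) :: stack => costL indices (rest.drop stack.length) avail + costStack rest stack

-- the value B's machine will produce from a given stack, expressed through A's loop
def answerS (rest : List (String × List Int)) : List (String × List Int × List Int) → List Int → Option (PySem.Dict String Int)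
  | [], _ => none
  | (field, indices, avail) :: stack, chosen =>
    match loopD field indices (rest.drop stack.length) avail with
    | some d => some (wrapD d stack chosen)
    | none => answerS rest stack chosen.tail

theorem one_le_costL (indices : List Int) (rest : List (String × List Int)) (avail : List Int) : 1 ≤ costL indices rest avail := by
  cases indices with
  | nil => simp [costL]
  | cons idx is =>
    rw [costL]
    split <;> [skip; omega]
    split <;> [omega; skip]
    split <;> omega

theorem one_le_costStack (rest : List (String × List Int)) (stack : List (String × List Int × List Int)) : 1 ≤ costStack rest stack := by
  cases stack with
  | nil => simp [costStack]
  | cons fr stack =>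
    obtain ⟨f, ind, av⟩ := fr
    have := one_le_costL ind (rest.drop stack.length) av
    simp [costStack]; omega

mutual
theorem costS_le (rest : List (String × List Int)) (avail : List Int) : costS rest avail ≤ fuelB rest := by
  match rest with
  | [] => simp [costS, fuelB]
  | (f, indices) :: r =>
    rw [costS, fuelB]
    have h := costL_le indices r avail
    omega
  termination_by (rest.length, 1, 0)
theorem costL_le (indices : List Int) (rest : List (String × List Int)) (avail : List Int) : costL indices rest avail ≤ indices.length * (1 + fuelB rest) + 1 := by
  match indices with
  | [] => simp [costL]
  | idx :: is =>
    have his := costL_le is rest avail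
    have hlen : (idx :: is).length * (1 + fuelB rest) = is.length * (1 + fuelB rest) + (1 + fuelB rest) := by
      simp [Nat.succ_mul]
    rw [costL]
    by_cases hc : avail.contains idx
    · by_cases hr : rest = []
      · subst hr; simp only [hc, if_true]; omega
      · cases hrm : PySem.Set.remove? avail idx with
        | none => simp only [hc, hr, if_true, if_false]; omega
        | some avail' =>
          have hs := costS_le rest avail'
          simp only [hc, hr, if_true, if_false]
          omega
    · simp only [hc, if_false, Bool.false_eq_true]; omega
  termination_by (rest.length + 1, 0, indices.length)
end

-- the machine, given enough fuel, computes answerS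
theorem runB_correct (rest : List (String × List Int)) : ∀ (fuel : Nat) (stack : List (String × List Int × List Int)) (chosen : List Int),
    stack.length ≤ rest.length + 1 → costStack rest stack ≤ fuel →
    runB rest fuel stack chosen = some (answerS rest stack chosen) := by
  intro fuel
  induction fuel with
  | zero =>
    intro stack chosen _ hcost
    exact absurd hcost (by have := one_le_costStack rest stack; omega)
  | succ fuel ih =>
    intro stack chosen hlen hcost
    cases stack with
    | nil => simp [runB, answerS]
    | cons fr stack =>
      obtain ⟨field, indices, avail⟩ := fr
      have hlen' : stack.length ≤ rest.length := by simpa using hlen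
      cases indices with
      | nil =>
        rw [runB, answerS, loopD]
        have : costStack rest stack ≤ fuel := by
          simp [costStack, costL] at hcost; omega
        exact ih stack chosen.tail (by omega) this
      | cons idx is =>
        rw [runB, answerS, loopD]
        by_cases hc : avail.contains idx
        · simp only [hc, if_true]
          by_cases heq : stack.length = rest.length
          · -- success leaf: no fields remain below
            have hdrop : rest.drop stack.length = [] := by
              rw [heq]; exact List.drop_length
            rw [if_pos heq, hdrop]
            rfl
          · have hlt : stack.length < rest.length := by omega
            have hne : rest.drop stack.length ≠ [] := by
              intro h
              have := List.drop_eq_nil_iff.mp h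
              omega
            simp only [heq, if_false]
            match hdr : rest.drop stack.length with
            | [] => exact absurd hdr hne
            | (nf, nind) :: rest'' =>
              have hmem : idx ∈ avail := by simpa using hc
              match hrm : PySem.Set.remove? avail idx with
              | none =>
                rw [PySem.Set.remove?_eq_none_iff] at hrm
                exact absurd hmem hrm
              | some avail' =>
                have hdrop1 : rest.drop (stack.length + 1) = rest'' := by
                  have h1 : (rest.drop stack.length).drop 1 = rest.drop (stack.length + 1) := by
                    rw [List.drop_drop]
                  rw [← h1, hdr]
                  rfl
                have hsd : searchD ((nf, nind) :: rest'') avail' = loopD nf nind rest'' avail' := by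
                  rw [searchD]
                simp only [costStack, hdr, costL, costS, hc, hrm, if_true, reduceCtorEq, if_false] at hcost
                have hcost' : costStack rest ((nf, nind, avail') :: (field, is, avail) :: stack) ≤ fuel := by
                  simp only [costStack, List.length_cons, hdrop1, hdr]
                  omega
                simp only [hsd]
                rw [ih _ (idx :: chosen) (by simp; omega) hcost']
                rw [answerS]
                simp only [List.length_cons, hdrop1]
                cases hld : loopD nf nind rest'' avail' with
                | some d => rfl
                | none =>
                  rw [answerS, hdr]
                  simp only [List.tail_cons, reduceCtorEq, reduceIte]
        · -- index not available: drop it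
          simp only [hc, if_false, Bool.false_eq_true]
          have hcost' : costStack rest ((field, is, avail) :: stack) ≤ fuel := by
            simp only [costStack, costL, hc, Bool.false_eq_true, if_false] at hcost ⊢
            omega
          rw [ih _ chosen (by simpa using hlen) hcost']
          rw [answerS]

-- ===== VERDICT (by name: the statement is the Claim_ definition above) =====
theorem search_spec : Claim_equal_search := by
  intro fields available _ hpre
  unfold Spec_search
  match fields with
  | [] => exact absurd rfl hpre
  | (field, indices) :: rest =>
    rw [search, search_alt, searchD]
    have hrun := runB_correct rest (indices.length * (1 + fuelB rest) + 2)
        [(field, indices, available)] [] (by simp) (by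
          have h := costL_le indices rest available
          simp only [costStack, List.length_nil, List.drop_zero]
          omega)
    rw [hrun]
    rw [answerS]
    simp only [List.length_nil, List.drop_zero]
    cases hld : loopD field indices rest available with
    | some d => simp [wrapD]
    | none => simp [answerS]
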